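-- pv_equiv track=rewrite | github.com/willizdev/compuba | Algoritmos/Introducción a la Programación/Python/Parciales/parcial2.py | elementos_exclusivos
-- ===== SOURCE A (Python) =====
-- def indice(s: list[int], n: int) -> int:
--     for i in range(0, len(s)):
--         if s[i] == n:
--             return i
--     return -1
--
-- def elementos_exclusivos(s: list[int], t: list[int]) -> list[int]:
--     res: list[int] = s
--     for i in range(0, len(t)):
--         j: int = indice(res, t[i])
--         if j != -1:
--             res.pop(j)
--             continue
--         res.append(t[i])
--     return res
-- ===== SOURCE B (Python) =====
-- def elementos_exclusivos(s, t):
--     # Counter-based O(len(s)+len(t)) algorithm.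
--     # Since a removal always removes the FIRST live occurrence of a value,
--     # the removed occurrences of each value v are exactly the first rem[v]
--     # occurrences of v in arr (= s followed by the appended elements).
--     arr = list(s)
--     cnt = {}
--     for x in arr:
--         cnt[x] = cnt.get(x, 0) + 1
--     rem = {}
--     for x in t:
--         if cnt.get(x, 0) - rem.get(x, 0) > 0:
--             rem[x] = rem.get(x, 0) + 1
--         else:
--             arr.append(x)
--             cnt[x] = cnt.get(x, 0) + 1
--     out = []
--     seen = {}
--     for x in arr:
--         k = seen.get(x, 0)
--         if k >= rem.get(x, 0):
--             out.append(x)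
--         seen[x] = k + 1
--     return out
-- ===== Notes on version B (the rewrite author's own statement) =====
-- stated objective: faster
-- what changed: Replaces A's per-element linear scan (indice) and list pop/append toggle loop by an O(|s|+|t|) counter algorithm: one dict pass counts occurrences, the toggle loop only updates per-value removal counters (removals always hit the first live occurrence, so counting suffices), and a final pass filters out the first rem[v] occurrences of each value v.
import Mathlib
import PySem

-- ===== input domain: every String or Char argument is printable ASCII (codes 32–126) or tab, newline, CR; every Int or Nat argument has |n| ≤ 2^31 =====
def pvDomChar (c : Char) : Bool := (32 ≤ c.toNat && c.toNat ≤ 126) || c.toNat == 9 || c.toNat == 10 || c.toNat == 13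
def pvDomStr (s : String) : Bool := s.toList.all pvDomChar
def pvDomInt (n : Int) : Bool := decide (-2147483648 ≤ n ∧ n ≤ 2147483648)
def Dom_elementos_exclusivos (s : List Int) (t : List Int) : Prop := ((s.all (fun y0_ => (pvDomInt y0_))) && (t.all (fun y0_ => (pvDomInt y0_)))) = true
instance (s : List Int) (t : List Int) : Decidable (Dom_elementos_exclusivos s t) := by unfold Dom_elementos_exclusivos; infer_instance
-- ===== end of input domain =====

-- B replaces A's quadratic scan-and-pop toggle loop by an O(|s|+|t|) counter algorithm
-- (per-value removal counters, then one filtering pass); return values agree — note that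
-- the Python A mutates its argument s in place while B does not (equivalence is about the
-- return value only).

-- ===== PORT A =====
-- 'def indice(s, n)': linear scan returning the first index of n in s, or -1.
def pvIndiceGo (s : List Int) (n : Int) (i : Int) : Int :=
  match s with
  | [] => -1
  | x :: xs => if x = n then i else pvIndiceGo xs n (i + 1)

def pvIndice (s : List Int) (n : Int) : Int := pvIndiceGo s n 0

def elementos_exclusivos (s : List Int) (t : List Int) : List Int :=
  t.foldl (fun res x =>
    let j := pvIndice res x
    if j ≠ -1 then
      match PySem.List.pop? res j with
      | some (_, rest) => rest
      | none => res      -- unreachable: j ≠ -1 is a valid index of res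
    else res ++ [x]) s

-- ===== PORT B =====
-- main loop state: (arr, cnt, rem)
def pvStepB (p : List Int × PySem.Dict Int Int × PySem.Dict Int Int) (x : Int) :
    List Int × PySem.Dict Int Int × PySem.Dict Int Int :=
  match p with
  | (arr, cnt, rem) =>
    if cnt.getD x 0 - rem.getD x 0 > 0 then
      (arr, cnt, rem.insert x (rem.getD x 0 + 1))
    else
      (arr ++ [x], cnt.insert x (cnt.getD x 0 + 1), rem)

-- final pass state: (out, seen)
def pvPassStep (rem : PySem.Dict Int Int) (q : List Int × PySem.Dict Int Int) (x : Int) :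
    List Int × PySem.Dict Int Int :=
  match q with
  | (out, seen) =>
    let k := seen.getD x 0
    ((if k ≥ rem.getD x 0 then out ++ [x] else out), seen.insert x (k + 1))

def elementos_exclusivos_alt (s : List Int) (t : List Int) : List Int :=
  let arr := s
  let cnt := arr.foldl (fun d x => d.insert x (d.getD x 0 + 1)) PySem.Dict.empty
  match t.foldl pvStepB (arr, cnt, PySem.Dict.empty) with
  | (arr, _, rem) => (arr.foldl (pvPassStep rem) ([], PySem.Dict.empty)).1

-- ===== PRECONDITION & SPEC =====
def Spec_elementos_exclusivos (s : List Int) (t : List Int) (out : List Int) : Prop := out = elementos_exclusivos_alt s t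
instance (s : List Int) (t : List Int) (out : List Int) : Decidable (Spec_elementos_exclusivos s t out) := by unfold Spec_elementos_exclusivos; infer_instance

-- ===== CLAIM (what is proved, stated in full; the proofs are below) =====
def Claim_equal_elementos_exclusivos : Prop := ∀ (s : List Int) (t : List Int), Dom_elementos_exclusivos s t → Spec_elementos_exclusivos s t (elementos_exclusivos s t)

-- ===== LEMMAS AND PROOFS =====

-- A's step, abstractly: remove the first occurrence, else append.
def pvToggle (res : List Int) (x : Int) : List Int :=
  if x ∈ res then res.erase x else res ++ [x]

-- remove, for each value v, its first (f v) occurrences from arr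
def pvKill : List Int → (Int → Int) → List Int
  | [], _ => []
  | a :: as, f =>
    if 0 < f a then pvKill as (fun w => if w = a then f a - 1 else f w)
    else a :: pvKill as f

theorem pvIndiceGo_eq (s : List Int) (n : Int) (i : Int) :
    pvIndiceGo s n i = if n ∈ s then i + (s.idxOf n : Int) else -1 := by
  induction s generalizing i with
  | nil => simp [pvIndiceGo]
  | cons a as ih =>
    by_cases h : a = n
    · subst h; simp [pvIndiceGo, List.idxOf_cons_self]
    · have hne : n ≠ a := fun hc => h hc.symm
      simp only [pvIndiceGo, if_neg h, ih, List.mem_cons]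
      rcases Decidable.em (n ∈ as) with hm | hm
      · simp only [hm, hne, false_or, if_true, or_true,
          List.idxOf_cons_ne _ (by simpa using h)]
        push_cast; ring
      · simp [hm, hne]

theorem pvEraseIdx_idxOf (res : List Int) (x : Int) (h : x ∈ res) :
    res.eraseIdx (res.idxOf x) = res.erase x := by
  induction res with
  | nil => cases h
  | cons a as ih =>
    by_cases hax : a = x
    · subst hax; simp [List.idxOf_cons_self, List.erase_cons_head]
    · have hx : x ∈ as := by
        rcases List.mem_cons.1 h with h1 | h1
        · exact absurd h1.symm hax
        · exact h1
      rw [List.idxOf_cons_ne _ (by simpa using hax), List.eraseIdx_cons_succ,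
        List.erase_cons_tail (by simpa using fun hc : a = x => hax hc), ih hx]

theorem pvStepA_eq_toggle (res : List Int) (x : Int) :
    (let j := pvIndice res x
     if j ≠ -1 then
       match PySem.List.pop? res j with
       | some (_, rest) => rest
       | none => res
     else res ++ [x]) = pvToggle res x := by
  by_cases h : x ∈ res
  · have hidx : pvIndice res x = (res.idxOf x : Int) := by
      simp [pvIndice, pvIndiceGo_eq, h]
    have hlt : res.idxOf x < res.length := List.idxOf_lt_length_of_mem h
    have hpop := PySem.List.pop?_natCast (xs := res) (n := res.idxOf x) hlt
    have hne : ((res.idxOf x : Int) ≠ -1) := by omega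
    simp only [hidx, pvToggle, if_pos h, hpop, if_pos hne]
    exact pvEraseIdx_idxOf res x h
  · have hidx : pvIndice res x = -1 := by simp [pvIndice, pvIndiceGo_eq, h]
    simp [hidx, pvToggle, h]

theorem pvA_eq_foldl_toggle (s t : List Int) :
    elementos_exclusivos s t = t.foldl pvToggle s := by
  unfold elementos_exclusivos
  congr 1
  funext res x
  exact pvStepA_eq_toggle res x

theorem pvKill_cons_pos (a : Int) (as : List Int) (f : Int → Int) (h : 0 < f a) :
    pvKill (a :: as) f = pvKill as (fun w => if w = a then f a - 1 else f w) := by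
  simp [pvKill, h]

theorem pvKill_cons_neg (a : Int) (as : List Int) (f : Int → Int) (h : ¬ 0 < f a) :
    pvKill (a :: as) f = a :: pvKill as f := by
  simp [pvKill, h]

-- pvKill only looks at the positive part of its counter function
theorem pvKill_congr (arr : List Int) (f g : Int → Int)
    (h : ∀ w, (0 < f w ∨ 0 < g w) → f w = g w) :
    pvKill arr f = pvKill arr g := by
  induction arr generalizing f g with
  | nil => rfl
  | cons a as ih =>
    by_cases hf : 0 < f a
    · have heq : f a = g a := h a (Or.inl hf)
      have hg : 0 < g a := heq ▸ hf
      rw [pvKill_cons_pos a as f hf, pvKill_cons_pos a as g hg]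
      apply ih
      intro w hw
      by_cases hwa : w = a
      · subst hwa; simp [heq]
      · simp only [if_neg hwa] at hw ⊢; exact h w hw
    · have hg : ¬ 0 < g a := fun hc => hf ((h a (Or.inr hc)) ▸ hc)
      rw [pvKill_cons_neg a as f hf, pvKill_cons_neg a as g hg]
      exact congrArg _ (ih f g h)

theorem pvKill_zero (arr : List Int) (f : Int → Int) (h : ∀ w, f w ≤ 0) :
    pvKill arr f = arr := by
  induction arr generalizing f with
  | nil => rfl
  | cons a as ih =>
    rw [pvKill_cons_neg a as f (by have := h a; omega)]
    exact congrArg _ (ih f h)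

theorem pvKill_mem (arr : List Int) (f : Int → Int) (hf : ∀ w, 0 ≤ f w) (v : Int) :
    v ∈ pvKill arr f ↔ f v < (arr.count v : Int) := by
  induction arr generalizing f with
  | nil => simp [pvKill]; have := hf v; omega
  | cons a as ih =>
    by_cases hva : v = a
    · subst hva
      have hcnt : ((v :: as).count v : Int) = (as.count v : Int) + 1 := by
        rw [List.count_cons_self]; push_cast; ring
      by_cases hfv : 0 < f v
      · rw [pvKill_cons_pos v as f hfv,
          ih _ (by intro w; by_cases hw : w = v <;> simp [hw] <;> [omega; exact hf w])]
        rw [if_pos rfl]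
        omega
      · rw [pvKill_cons_neg v as f hfv]
        simp only [List.mem_cons, true_or, true_iff]
        omega
    · have hcnt : ((a :: as).count v : Int) = (as.count v : Int) := by
        rw [List.count_cons_of_ne (fun hc => hva hc.symm)]
      by_cases hfa : 0 < f a
      · rw [pvKill_cons_pos a as f hfa,
          ih _ (by intro w; by_cases hw : w = a <;> simp [hw] <;> [omega; exact hf w])]
        rw [if_neg hva]
        omega
      · rw [pvKill_cons_neg a as f hfa]
        simp only [List.mem_cons, hva, false_or, ih f hf]
        omega

theorem pvKill_incr (arr : List Int) (f : Int → Int) (v : Int)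
    (hf : ∀ w, 0 ≤ f w) (hlt : f v < (arr.count v : Int)) :
    pvKill arr (fun w => if w = v then f v + 1 else f w) = (pvKill arr f).erase v := by
  induction arr generalizing f with
  | nil => simp at hlt; have := hf v; omega
  | cons a as ih =>
    by_cases hav : a = v
    · subst hav
      have hpos : (0 : Int) < (fun w => if w = a then f a + 1 else f w) a := by
        simp; have := hf a; omega
      rw [pvKill_cons_pos a as _ hpos]
      have hfun : (fun w => if w = a then (fun w => if w = a then f a + 1 else f w) a - 1
          else (fun w => if w = a then f a + 1 else f w) w) = f := by
        funext w; by_cases hw : w = a <;> simp [hw]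
      rw [hfun]
      have hcnt : ((a :: as).count a : Int) = (as.count a : Int) + 1 := by
        rw [List.count_cons_self]; push_cast; ring
      by_cases hfa : 0 < f a
      · rw [pvKill_cons_pos a as f hfa]
        have hih := ih (fun w => if w = a then f a - 1 else f w)
          (by intro w; by_cases hw : w = a <;> simp [hw] <;> [omega; exact hf w])
          (by simp; omega)
        rw [← hih]
        apply pvKill_congr
        intro w _
        by_cases hw : w = a <;> simp [hw]
      · have hfa0 : f a = 0 := by have := hf a; omega
        rw [pvKill_cons_neg a as f hfa, List.erase_cons_head]
    · have hva : v ≠ a := fun hc => hav hc.symm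
      have hcnt : ((a :: as).count v : Int) = (as.count v : Int) := by
        rw [List.count_cons_of_ne (fun hc => hva hc.symm)]
      by_cases hfa : 0 < f a
      · have hpos : (0 : Int) < (fun w => if w = v then f v + 1 else f w) a := by
          simp only [if_neg hav]; omega
        rw [pvKill_cons_pos a as _ hpos, pvKill_cons_pos a as f hfa]
        have hih := ih (fun w => if w = a then f a - 1 else f w)
          (by intro w; by_cases hw : w = a <;> simp [hw] <;> [omega; exact hf w])
          (by simp only [if_neg hva]; push_cast [hcnt] at hlt; omega)
        rw [← hih]
        apply pvKill_congr
        intro w _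
        by_cases hwv : w = v
        · subst hwv; simp [hav, hva]
        · by_cases hwa : w = a <;> simp [hwv, hwa, hav]
      · have hneg : ¬ (0 : Int) < (fun w => if w = v then f v + 1 else f w) a := by
          simp only [if_neg hav]; omega
        rw [pvKill_cons_neg a as _ hneg, pvKill_cons_neg a as f hfa,
          List.erase_cons_tail (by simpa using hav)]
        exact congrArg _ (ih f hf (by omega))

theorem pvKill_append (arr : List Int) (x : Int) (f : Int → Int)
    (hf : ∀ w, 0 ≤ f w) (hle : f x ≤ (arr.count x : Int)) :
    pvKill (arr ++ [x]) f = pvKill arr f ++ [x] := by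
  induction arr generalizing f with
  | nil =>
    have hz : f x = 0 := by simp at hle; have := hf x; omega
    simp [pvKill, hz]
  | cons a as ih =>
    have hcnt : ((a :: as).count x : Int) = (as.count x : Int) + (if x = a then 1 else 0) := by
      by_cases hxa : x = a
      · subst hxa; rw [List.count_cons_self]; push_cast; simp
      · rw [List.count_cons_of_ne (fun hc => hxa hc.symm)]; simp [hxa]
    by_cases hfa : 0 < f a
    · rw [List.cons_append, pvKill_cons_pos a _ f hfa, pvKill_cons_pos a as f hfa]
      apply ih
      · intro w; by_cases hw : w = a <;> simp [hw] <;> [omega; exact hf w]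
      · by_cases hxa : x = a
        · subst hxa
          show (if (x : Int) = x then f x - 1 else f x) ≤ ((as.count x : Nat) : Int)
          rw [if_pos rfl]; rw [List.count_cons_self] at hle; push_cast at hle ⊢; omega
        · show (if (x : Int) = a then f a - 1 else f x) ≤ ((as.count x : Nat) : Int)
          rw [if_neg hxa]; simp only [if_neg hxa] at hcnt; omega
    · rw [List.cons_append, pvKill_cons_neg a _ f hfa, pvKill_cons_neg a as f hfa,
        List.cons_append]
      refine congrArg _ (ih f hf ?_)
      by_cases hxa : x = a
      · subst hxa; simp only [if_pos rfl] at hcnt; omega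
      · simp only [if_neg hxa] at hcnt; omega

-- B's filtering pass computes pvKill
theorem pvPass_eq_kill (arr : List Int) (rem : PySem.Dict Int Int)
    (seen : PySem.Dict Int Int) (out : List Int) :
    (arr.foldl (pvPassStep rem) (out, seen)).1
      = out ++ pvKill arr (fun v => rem.getD v 0 - seen.getD v 0) := by
  induction arr generalizing seen out with
  | nil => simp [pvKill]
  | cons a as ih =>
    by_cases h : seen.getD a 0 ≥ rem.getD a 0
    · simp only [List.foldl_cons, pvPassStep, if_pos h]
      rw [ih]
      simp only [pvKill, if_neg (by omega : ¬ (0 : Int) < rem.getD a 0 - seen.getD a 0),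
        List.append_assoc, List.singleton_append]
      refine congrArg _ (congrArg _ ?_)
      apply pvKill_congr
      intro w hw
      by_cases hwa : w = a
      · subst hwa; simp [PySem.Dict.getD_insert] at hw ⊢; omega
      · simp [PySem.Dict.getD_insert, hwa]
    · simp only [List.foldl_cons, pvPassStep, if_neg h]
      rw [ih]
      simp only [pvKill, if_pos (by omega : (0 : Int) < rem.getD a 0 - seen.getD a 0)]
      refine congrArg _ ?_
      apply pvKill_congr
      intro w _
      by_cases hwa : w = a <;> simp [PySem.Dict.getD_insert, hwa] <;> omega

-- main loop invariant
theorem pvLoop_inv (t : List Int) :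
    ∀ (arr : List Int) (cnt rem : PySem.Dict Int Int) (res : List Int),
    (∀ v, cnt.getD v 0 = (arr.count v : Int)) →
    (∀ v, 0 ≤ rem.getD v 0 ∧ rem.getD v 0 ≤ (arr.count v : Int)) →
    pvKill arr (fun v => rem.getD v 0) = res →
    (match t.foldl pvStepB (arr, cnt, rem) with
     | (arr', _, rem') => pvKill arr' (fun v => rem'.getD v 0)) = t.foldl pvToggle res := by
  induction t with
  | nil => intro arr cnt rem res _ _ hk; simpa using hk
  | cons x ts ih =>
    intro arr cnt rem res hcnt hrem hk
    have hnn : ∀ w, 0 ≤ rem.getD w 0 := fun w => (hrem w).1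
    by_cases hc : cnt.getD x 0 - rem.getD x 0 > 0
    · -- removal branch
      have hlt : rem.getD x 0 < (arr.count x : Int) := by have := hcnt x; omega
      have hmem : x ∈ res := by rw [← hk]; exact (pvKill_mem arr _ hnn x).2 hlt
      simp only [List.foldl_cons, pvStepB, if_pos hc, pvToggle, if_pos hmem]
      apply ih
      · exact hcnt
      · intro v
        by_cases hv : v = x
        · rw [hv, show (rem.insert x (rem.getD x 0 + 1)).getD x 0 = rem.getD x 0 + 1 from by
            simp [PySem.Dict.getD_insert]]
          exact ⟨by have := hnn x; omega, by omega⟩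
        · simp [PySem.Dict.getD_insert, hv]; exact hrem v
      · rw [show (fun v => (rem.insert x (rem.getD x 0 + 1)).getD v 0)
              = (fun w => if w = x then rem.getD x 0 + 1 else rem.getD w 0) from by
            funext w; simp [PySem.Dict.getD_insert]]
        rw [pvKill_incr arr _ x hnn hlt, hk]
    · -- append branch
      have hle : rem.getD x 0 ≤ (arr.count x : Int) := (hrem x).2
      have heq : rem.getD x 0 = (arr.count x : Int) := by have := hcnt x; omega
      have hnm : x ∉ res := by
        rw [← hk]; intro hm
        exact absurd ((pvKill_mem arr _ hnn x).1 hm) (by omega)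
      simp only [List.foldl_cons, pvStepB, if_neg hc, pvToggle, if_neg hnm]
      apply ih
      · intro v
        by_cases hv : v = x
        · rw [hv]; simp [PySem.Dict.getD_insert, hcnt x, List.count_append]
        · simp [PySem.Dict.getD_insert, hv, hcnt v, List.count_append, List.count_singleton]
          exact fun hc => hv hc.symm
      · intro v
        refine ⟨(hrem v).1, ?_⟩
        have := (hrem v).2
        have hcle : (arr.count v : Int) ≤ ((arr ++ [x]).count v : Int) := by
          simp [List.count_append]
        omega
      · rw [pvKill_append arr x _ hnn hle, hk]

theorem pvB_eq_foldl_toggle (s t : List Int) :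
    elementos_exclusivos_alt s t = t.foldl pvToggle s := by
  simp only [elementos_exclusivos_alt]
  have hcnt0 : ∀ v, (s.foldl (fun d x => d.insert x (d.getD x 0 + 1)) PySem.Dict.empty).getD v 0
      = (s.count v : Int) := by
    intro v; rw [PySem.Dict.getD_foldl_insert_add_one]; simp
  have hrem0 : ∀ v, (PySem.Dict.empty : PySem.Dict Int Int).getD v 0 = 0 := by
    intro v; simp [PySem.Dict.getD_empty]
  have hk0 : pvKill s (fun v => (PySem.Dict.empty : PySem.Dict Int Int).getD v 0) = s := by
    apply pvKill_zero; intro w; rw [hrem0 w]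
  have hinv := pvLoop_inv t s _ PySem.Dict.empty s hcnt0
    (fun v => by rw [hrem0 v]; exact ⟨le_refl _, Int.natCast_nonneg _⟩) hk0
  rcases hfold : t.foldl pvStepB (s, s.foldl (fun d x => d.insert x (d.getD x 0 + 1)) PySem.Dict.empty, PySem.Dict.empty) with ⟨arr', cnt', rem'⟩
  rw [hfold] at hinv
  dsimp only at hinv ⊢
  rw [pvPass_eq_kill arr' rem' PySem.Dict.empty []]
  simp only [List.nil_append]
  rw [show (fun v => rem'.getD v 0 - (PySem.Dict.empty : PySem.Dict Int Int).getD v 0)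
        = (fun v => rem'.getD v 0) from by funext v; simp [PySem.Dict.getD_empty]]
  exact hinv

-- ===== VERDICT (by name: the statement is the Claim_ definition above) =====
theorem elementos_exclusivos_spec : Claim_equal_elementos_exclusivos := by
  intro s t _
  unfold Spec_elementos_exclusivos
  rw [pvA_eq_foldl_toggle, pvB_eq_foldl_toggle]
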